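-- pv_equiv track=rewrite | github.com/MrNakaan/eJSON | ejson_cycles.py | find_circular_inheritance
-- ===== SOURCE A (Python) =====
-- def find_circular_inheritance(configs):
-- 	for c in configs.keys():
-- 		inheritance_group = [c]
-- 		to_check = [c]
-- 		while len(to_check) > 0:
-- 			if "extends" not in configs[to_check[0]].keys():
-- 				break
-- 			extends = configs[to_check[0]]["extends"]
-- 			if extends in inheritance_group:
-- 				inheritance_group.append(extends)
-- 				return inheritance_group
-- 			to_check.append(extends)
-- 			inheritance_group.append(extends)
-- 			to_check.remove(to_check[0])
-- ===== SOURCE B (Python) =====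
-- def find_circular_inheritance(configs):
-- 	# Global fixpoint: compute once the set of keys whose inheritance chain
-- 	# terminates ("safe"), then reconstruct the chain for the first unsafe key.
-- 	safe = set()
-- 	changed = True
-- 	while changed:
-- 		changed = False
-- 		for key in configs:
-- 			cfg = configs[key]
-- 			if key not in safe and ("extends" not in cfg or cfg["extends"] in safe):
-- 				safe.add(key)
-- 				changed = True
-- 	for c in configs:
-- 		if c not in safe:
-- 			path = [c]
-- 			cur = c
-- 			while True:
-- 				nxt = configs[cur]["extends"]
-- 				if nxt in path:
-- 					path.append(nxt)
-- 					return path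
-- 				path.append(nxt)
-- 				cur = nxt
-- 	return None
-- ===== Notes on version B (the rewrite author's own statement) =====
-- stated objective: alternative
-- what changed: A walks the inheritance chain separately from every key with an O(length) list-membership test inside the walk; B instead computes once, by a global fixpoint iteration, the set of keys whose chain terminates, and walks a chain only for the first key outside that set.
-- outside the precondition, e.g. on find_circular_inheritance({'a': {'extends': 'a'}, 'b': {'extends': 'z'}}): A returns ['a', 'a'], B returns ['a', 'a']
import Mathlib
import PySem

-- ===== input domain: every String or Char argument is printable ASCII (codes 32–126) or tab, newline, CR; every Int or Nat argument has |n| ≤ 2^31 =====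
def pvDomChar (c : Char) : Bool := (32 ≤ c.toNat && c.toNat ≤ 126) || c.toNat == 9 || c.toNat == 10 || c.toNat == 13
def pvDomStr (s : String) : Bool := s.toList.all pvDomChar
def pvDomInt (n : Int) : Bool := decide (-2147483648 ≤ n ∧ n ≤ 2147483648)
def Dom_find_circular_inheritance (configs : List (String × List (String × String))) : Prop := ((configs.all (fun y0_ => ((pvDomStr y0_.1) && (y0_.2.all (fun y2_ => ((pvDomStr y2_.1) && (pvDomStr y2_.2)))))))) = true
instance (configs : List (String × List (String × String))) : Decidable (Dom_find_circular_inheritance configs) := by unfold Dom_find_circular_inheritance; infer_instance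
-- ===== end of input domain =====

-- B replaces A's per-key chain walks by ONE global fixpoint computation of the keys whose
-- chain terminates ("safe"), then reconstructs the chain only for the first unsafe key.


-- ===== PORT A =====
-- shared dict primitives: first-match lookup, the assoc-list reading of Python's `configs[k]`
-- and `cfg["extends"]`
def pvLookup (d : List (String × List (String × String))) (k : String) :
    Option (List (String × String)) :=
  PySem.Dict.get? (PySem.Dict.mk d) k

def pvExtends (cfg : List (String × String)) : Option String :=
  PySem.Dict.get? (PySem.Dict.mk cfg) "extends"

-- body of A's `while len(to_check) > 0` loop; the fuel only guards termination
def pvWalkA (d : List (String × List (String × String)))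
    (group to_check : List String) : Nat → Option (List String)
  | 0 => none  -- fuel exhausted: unreachable on inputs satisfying Pre_
  | n + 1 =>
    match to_check with
    | [] => none  -- while condition fails
    | t0 :: _ =>
      match pvLookup d t0 with
      | none => none  -- Python raises KeyError here; excluded by Pre_
      | some cfg =>
        match pvExtends cfg with
        | none => none  -- break
        | some e =>
          if e ∈ group then some (group ++ [e])
          else pvWalkA d (group ++ [e])
                 ((PySem.List.remove? (to_check ++ [e]) t0).getD []) n
                 -- remove? never fails: t0 is the head of to_check

-- A's outer `for c in configs.keys()` loop
def pvLoopA (d : List (String × List (String × String))) :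
    List String → Option (List String)
  | [] => none
  | c :: cs =>
    match pvWalkA d [c] [c] (d.length + 1) with
    | some p => some p
    | none => pvLoopA d cs

def find_circular_inheritance (configs : List (String × List (String × String))) :
    Option (List String) :=
  pvLoopA configs (PySem.List.dedup (configs.map Prod.fst))

-- ===== PORT B =====
-- one step of B's inner `for key in configs` pass (state: the safe set and the changed flag)
def pvRoundStep (d : List (String × List (String × String)))
    (sc : List String × Bool) (k : String) : List String × Bool :=
  match pvLookup d k with
  | none => sc  -- unreachable: k is drawn from the keys of d
  | some cfg =>
    if k ∈ sc.1 then sc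
    else
      match pvExtends cfg with
      | none => (PySem.Set.add sc.1 k, true)
      | some e => if e ∈ sc.1 then (PySem.Set.add sc.1 k, true) else sc

-- one pass of B's `while changed` loop
def pvRound (d : List (String × List (String × String)))
    (sc : List String × Bool) : List String × Bool :=
  (PySem.List.dedup (d.map Prod.fst)).foldl (pvRoundStep d) sc

-- B's `while changed` loop; the fuel only guards termination (each continuing pass grows `s`)
def pvFix (d : List (String × List (String × String))) :
    Nat → List String → List String
  | 0, s => s  -- fuel exhausted: unreachable
  | n + 1, s =>
    match pvRound d (s, false) with
    | (s', true) => pvFix d n s'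
    | (s', false) => s'

def pvSafe (d : List (String × List (String × String))) : List String :=
  pvFix d ((PySem.List.dedup (d.map Prod.fst)).length + 1) []

-- B's reconstruction `while True` loop; the fuel only guards termination
def pvWalkB (d : List (String × List (String × String)))
    (path : List String) (cur : String) : Nat → Option (List String)
  | 0 => none  -- fuel exhausted: unreachable, an unsafe chain repeats a node
  | n + 1 =>
    match pvLookup d cur with
    | none => none  -- Python raises KeyError; excluded by Pre_
    | some cfg =>
      match pvExtends cfg with
      | none => none  -- Python raises KeyError; unreachable for an unsafe start
      | some nxt =>
        if nxt ∈ path then some (path ++ [nxt])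
        else pvWalkB d (path ++ [nxt]) nxt n

-- B's `for c in configs` loop
def pvLoopB (d : List (String × List (String × String))) (safe : List String) :
    List String → Option (List String)
  | [] => none
  | c :: cs => if c ∈ safe then pvLoopB d safe cs else pvWalkB d [c] c (d.length + 1)

def find_circular_inheritance_alt (configs : List (String × List (String × String))) :
    Option (List String) :=
  pvLoopB configs (pvSafe configs) (PySem.List.dedup (configs.map Prod.fst))

-- ===== PRECONDITION & SPEC =====
-- Pre_ excludes configs in which some "extends" value is not a key of configs: on such inputs a
-- chain can leave the key set and Python A raises KeyError there (except when an earlier key's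
-- cycle returns first, an order accident).
def Pre_find_circular_inheritance (configs : List (String × List (String × String))) : Prop :=
  ∀ p ∈ configs,
    ((PySem.Dict.get? (PySem.Dict.mk p.2) "extends").all
      (fun e => decide (e ∈ configs.map Prod.fst))) = true
instance (configs : List (String × List (String × String))) : Decidable (Pre_find_circular_inheritance configs) := by unfold Pre_find_circular_inheritance; infer_instance

def pvWitness_find_circular_inheritance : (List (String × List (String × String))) :=
  [("a", [("extends", "b")]), ("b", [])]

def Spec_find_circular_inheritance (configs : List (String × List (String × String))) (out : Option (List String)) : Prop := out = find_circular_inheritance_alt configs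
instance (configs : List (String × List (String × String))) (out : Option (List String)) : Decidable (Spec_find_circular_inheritance configs out) := by unfold Spec_find_circular_inheritance; infer_instance

-- ===== CLAIM (what is proved, stated in full; the proofs are below) =====
def Claim_equal_find_circular_inheritance : Prop := ∀ (configs : List (String × List (String × String))), Dom_find_circular_inheritance configs → Pre_find_circular_inheritance configs → Spec_find_circular_inheritance configs (find_circular_inheritance configs)

-- ===== LEMMAS AND PROOFS =====

-- the successor function of the inheritance chain, and its iterates
def pvStep (d : List (String × List (String × String))) (x : String) : Option String :=
  (pvLookup d x).bind pvExtends

def pvTerm (d : List (String × List (String × String))) : Nat → String → Bool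
  | 0, _ => false
  | n + 1, x => match pvStep d x with | none => true | some e => pvTerm d n e

def pvIter (d : List (String × List (String × String))) : Nat → String → Option String
  | 0, x => some x
  | k + 1, x => match pvStep d x with | none => none | some e => pvIter d k e

theorem pvTerm_step (d : List (String × List (String × String))) :
    ∀ n x, pvTerm d n x = true → pvTerm d (n + 1) x = true := by
  intro n
  induction n with
  | zero => intro x h; simp [pvTerm] at h
  | succ n ih =>
    intro x h
    simp only [pvTerm] at h ⊢
    cases hs : pvStep d x with
    | none => rfl
    | some e => rw [hs] at h; exact ih e h

theorem pvTerm_le (d : List (String × List (String × String))) {n m : Nat} {x : String}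
    (h : pvTerm d n x = true) (hnm : n ≤ m) : pvTerm d m x = true := by
  induction hnm with
  | refl => exact h
  | step _ ih => exact pvTerm_step d _ x ih

theorem pvIter_add (d : List (String × List (String × String))) :
    ∀ (a b : Nat) (x : String),
      pvIter d (a + b) x = (pvIter d a x).bind (fun y => pvIter d b y) := by
  intro a
  induction a with
  | zero => intro b x; simp [pvIter]
  | succ a ih =>
    intro b x
    have h1 : a + 1 + b = (a + b) + 1 := by omega
    rw [h1]
    simp only [pvIter]
    cases hs : pvStep d x with
    | none => simp
    | some e => exact ih b e

theorem pvIter_no_cycle (d : List (String × List (String × String))) :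
    ∀ n x k, pvTerm d n x = true → pvIter d (k + 1) x ≠ some x := by
  intro n
  induction n with
  | zero => intro x k h; simp [pvTerm] at h
  | succ n ih =>
    intro x k h hcy
    simp only [pvTerm] at h
    cases hs : pvStep d x with
    | none => rw [show pvIter d (k + 1) x = (match pvStep d x with
        | none => none | some e => pvIter d k e) from rfl, hs] at hcy; simp at hcy
    | some e =>
      rw [hs] at h
      have hke : pvIter d k e = some x := by simpa only [pvIter, hs] using hcy
      have h1 : pvIter d 1 x = some e := by simp [pvIter, hs]
      have : pvIter d (k + 1) e = some e := by
        rw [pvIter_add d k 1, hke]; simpa using h1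
      exact ih e k h this

theorem pvGet?_mk_mem {ν : Type} (l : List (String × ν)) (k : String) (v : ν)
    (h : PySem.Dict.get? (PySem.Dict.mk l) k = some v) : (k, v) ∈ l := by
  induction l with
  | nil => simp [PySem.Dict.get?] at h
  | cons p t ih =>
    obtain ⟨a, b⟩ := p
    rw [PySem.Dict.get?_mk_cons] at h
    by_cases hak : a = k
    · subst hak
      simp only [BEq.rfl, if_true, Option.some.injEq] at h
      subst h; exact List.mem_cons_self ..
    · rw [if_neg (by simpa using hak)] at h
      exact List.mem_cons_of_mem _ (ih h)

theorem pvLookup_isSome (d : List (String × List (String × String))) (x : String)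
    (h : x ∈ d.map Prod.fst) : ∃ cfg, pvLookup d x = some cfg := by
  induction d with
  | nil => simp at h
  | cons p t ih =>
    obtain ⟨a, b⟩ := p
    unfold pvLookup
    rw [PySem.Dict.get?_mk_cons]
    by_cases hak : a = x
    · exact ⟨b, by simp [hak]⟩
    · rw [if_neg (by simpa using hak)]
      apply ih
      simp only [List.map_cons, List.mem_cons] at h
      rcases h with h | h
      · exact absurd h.symm hak
      · exact h

theorem pvStep_closed {d : List (String × List (String × String))}
    (hP : Pre_find_circular_inheritance d) {x e : String}
    (h : pvStep d x = some e) : e ∈ d.map Prod.fst := by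
  unfold pvStep at h
  cases hl : pvLookup d x with
  | none => rw [hl] at h; simp at h
  | some cfg =>
    rw [hl] at h
    simp only [Option.bind_some] at h
    have hmem : (x, cfg) ∈ d := pvGet?_mk_mem d x cfg hl
    have h2 := hP (x, cfg) hmem
    unfold pvExtends at h
    rw [h] at h2
    simpa using h2

theorem pvWalkAB (d : List (String × List (String × String))) :
    ∀ n group cur, pvWalkA d group [cur] n = pvWalkB d group cur n := by
  intro n
  induction n with
  | zero => intro group cur; rfl
  | succ n ih =>
    intro group cur
    cases hl : pvLookup d cur with
    | none => simp only [pvWalkA, pvWalkB, hl]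
    | some cfg =>
      cases he : pvExtends cfg with
      | none => simp only [pvWalkA, pvWalkB, hl, he]
      | some e =>
        simp only [pvWalkA, pvWalkB, hl, he]
        by_cases hmem : e ∈ group
        · simp [hmem]
        · rw [if_neg hmem, if_neg hmem,
            show ([cur] ++ [e] : List String) = cur :: [e] from rfl,
            PySem.List.remove?_cons_self]
          exact ih (group ++ [e]) e

theorem pvWalkB_none_of_term (d : List (String × List (String × String))) :
    ∀ f n group x, pvTerm d n x = true →
      (∀ y ∈ group, ∃ k, pvIter d k y = some x) →
      pvWalkB d group x f = none := by
  intro f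
  induction f with
  | zero => intro n group x _ _; rfl
  | succ f ih =>
    intro n group x ht hg
    cases hl : pvLookup d x with
    | none => simp only [pvWalkB, hl]
    | some cfg =>
      cases he : pvExtends cfg with
      | none => simp only [pvWalkB, hl, he]
      | some e =>
        simp only [pvWalkB, hl, he]
        have hstep : pvStep d x = some e := by simp [pvStep, hl, he]
        cases n with
        | zero => simp [pvTerm] at ht
        | succ n =>
          simp only [pvTerm, hstep] at ht
          by_cases hmem : e ∈ group
          · exfalso
            obtain ⟨k, hk⟩ := hg e hmem
            have h1 : pvIter d 1 x = some e := by simp [pvIter, hstep]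
            have hcy : pvIter d (k + 1) e = some e := by
              rw [pvIter_add d k 1, hk]; simpa using h1
            exact pvIter_no_cycle d n e k ht hcy
          · rw [if_neg hmem]
            apply ih n (group ++ [e]) e ht
            intro y hy
            rcases List.mem_append.mp hy with hy | hy
            · obtain ⟨k, hk⟩ := hg y hy
              refine ⟨k + 1, ?_⟩
              rw [pvIter_add d k 1, hk]
              simp [pvIter, hstep]
            · simp only [List.mem_singleton] at hy
              subst hy; exact ⟨0, rfl⟩

theorem pvNodup_length_le (d : List (String × List (String × String)))
    {group : List String} (hnd : group.Nodup)
    (hsub : ∀ y ∈ group, y ∈ d.map Prod.fst) :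
    group.length ≤ (PySem.List.dedup (d.map Prod.fst)).length := by
  have hsub' : group ⊆ PySem.List.dedup (d.map Prod.fst) := fun y hy =>
    (PySem.List.mem_dedup _ _).mpr (hsub y hy)
  exact (hnd.subperm hsub').length_le

-- a walk that returns no cycle witnesses a terminating chain
theorem pvWalkB_none_term {d : List (String × List (String × String))}
    (hP : Pre_find_circular_inheritance d) :
    ∀ f group x, pvWalkB d group x f = none → group.Nodup →
      (∀ y ∈ group, y ∈ d.map Prod.fst) → x ∈ d.map Prod.fst →
      (PySem.List.dedup (d.map Prod.fst)).length < f + group.length →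
      pvTerm d ((PySem.List.dedup (d.map Prod.fst)).length + 1 - group.length) x = true := by
  intro f
  induction f with
  | zero =>
    intro group x _ hnd hsub _ hlt
    exact absurd (pvNodup_length_le d hnd hsub) (by omega)
  | succ f ih =>
    intro group x hw hnd hsub hx hlt
    obtain ⟨cfg, hl⟩ := pvLookup_isSome d x hx
    have hglen := pvNodup_length_le d hnd hsub
    cases he : pvExtends cfg with
    | none =>
      have hstep : pvStep d x = none := by simp [pvStep, hl, he]
      have h1 : pvTerm d 1 x = true := by simp [pvTerm, hstep]
      exact pvTerm_le d h1 (by omega)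
    | some e =>
      simp only [pvWalkB, hl, he] at hw
      by_cases hmem : e ∈ group
      · rw [if_pos hmem] at hw; simp at hw
      · rw [if_neg hmem] at hw
        have hstep : pvStep d x = some e := by simp [pvStep, hl, he]
        have he' : e ∈ d.map Prod.fst := pvStep_closed hP hstep
        have hnd' : (group ++ [e]).Nodup := by
          have hdisj : List.Disjoint group [e] := by
            intro a ha hb
            simp only [List.mem_singleton] at hb
            exact hmem (hb ▸ ha)
          exact hnd.append (List.nodup_singleton e) hdisj
        have hsub' : ∀ y ∈ group ++ [e], y ∈ d.map Prod.fst := by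
          intro y hy
          rcases List.mem_append.mp hy with hy | hy
          · exact hsub y hy
          · simp only [List.mem_singleton] at hy; subst hy; exact he'
        have hglen' := pvNodup_length_le d hnd' hsub'
        rw [List.length_append, List.length_singleton] at hglen'
        have ht := ih (group ++ [e]) e hw hnd' hsub' he'
          (by rw [List.length_append, List.length_singleton]; omega)
        rw [List.length_append, List.length_singleton] at ht
        have harith : (PySem.List.dedup (d.map Prod.fst)).length + 1 - group.length
            = ((PySem.List.dedup (d.map Prod.fst)).length + 1 - (group.length + 1)) + 1 := by
          omega
        rw [harith]
        simp only [pvTerm, hstep]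
        exact ht

-- ----- facts about one pass of B's fixpoint loop -----

theorem pvRoundStep_cases (d : List (String × List (String × String)))
    (sc : List String × Bool) (k : String) :
    pvRoundStep d sc k = sc ∨
      (k ∉ sc.1 ∧ pvRoundStep d sc k = (sc.1 ++ [k], true) ∧
        ∃ cfg, pvLookup d k = some cfg ∧
          (pvExtends cfg = none ∨ ∃ e, pvExtends cfg = some e ∧ e ∈ sc.1)) := by
  cases hl : pvLookup d k with
  | none => left; simp only [pvRoundStep, hl]
  | some cfg =>
    by_cases hk : k ∈ sc.1
    · left; simp only [pvRoundStep, hl, hk, if_true]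
    · cases he : pvExtends cfg with
      | none =>
        right
        refine ⟨hk, ?_, cfg, rfl, Or.inl he⟩
        simp [pvRoundStep, hl, hk, he]
      | some e =>
        by_cases hes : e ∈ sc.1
        · right
          refine ⟨hk, ?_, cfg, rfl, Or.inr ⟨e, he, hes⟩⟩
          simp [pvRoundStep, hl, hk, he, hes]
        · left
          simp [pvRoundStep, hl, hk, he, hes]

theorem pvRoundStep_stay (d : List (String × List (String × String)))
    (s : List String) (k : String) (cfg : List (String × String))
    (hcfg : pvLookup d k = some cfg)
    (h : pvRoundStep d (s, false) k = (s, false)) :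
    k ∈ s ∨ ∃ e, pvExtends cfg = some e ∧ e ∉ s := by
  by_cases hk : k ∈ s
  · exact Or.inl hk
  right
  cases he : pvExtends cfg with
  | none => exfalso; simp [pvRoundStep, hcfg, hk, he] at h
  | some e =>
    by_cases hes : e ∈ s
    · exfalso; simp [pvRoundStep, hcfg, hk, he, hes] at h
    · exact ⟨e, rfl, hes⟩

theorem pvRound_len (d : List (String × List (String × String))) :
    ∀ (l : List String) (sc : List String × Bool),
      sc.1.length ≤ (l.foldl (pvRoundStep d) sc).1.length := by
  intro l
  induction l with
  | nil => intro sc; exact Nat.le_refl _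
  | cons k t ih =>
    intro sc
    simp only [List.foldl_cons]
    rcases pvRoundStep_cases d sc k with hc | ⟨-, hc, -⟩
    · rw [hc]; exact ih sc
    · rw [hc]
      have := ih (sc.1 ++ [k], true)
      simp only [List.length_append, List.length_singleton] at this
      omega

theorem pvRound_nodup (d : List (String × List (String × String))) :
    ∀ (l : List String) (sc : List String × Bool), sc.1.Nodup →
      (l.foldl (pvRoundStep d) sc).1.Nodup ∧
      ∀ y ∈ (l.foldl (pvRoundStep d) sc).1, y ∈ sc.1 ∨ y ∈ l := by
  intro l
  induction l with
  | nil => intro sc hnd; exact ⟨hnd, fun y hy => Or.inl hy⟩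
  | cons k t ih =>
    intro sc hnd
    simp only [List.foldl_cons]
    rcases pvRoundStep_cases d sc k with hc | ⟨hk, hc, -⟩
    · rw [hc]
      obtain ⟨h1, h2⟩ := ih sc hnd
      refine ⟨h1, fun y hy => ?_⟩
      rcases h2 y hy with h | h
      · exact Or.inl h
      · exact Or.inr (List.mem_cons_of_mem _ h)
    · rw [hc]
      have hnd' : (sc.1 ++ [k]).Nodup := by
        have hdisj : List.Disjoint sc.1 [k] := by
          intro a ha hb
          simp only [List.mem_singleton] at hb
          exact hk (hb ▸ ha)
        exact hnd.append (List.nodup_singleton k) hdisj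
      obtain ⟨h1, h2⟩ := ih (sc.1 ++ [k], true) hnd'
      refine ⟨h1, fun y hy => ?_⟩
      rcases h2 y hy with h | h
      · rcases List.mem_append.mp h with h | h
        · exact Or.inl h
        · simp only [List.mem_singleton] at h
          exact Or.inr (h ▸ List.mem_cons_self ..)
      · exact Or.inr (List.mem_cons_of_mem _ h)

theorem pvRound_true (d : List (String × List (String × String))) :
    ∀ (l : List String) (s : List String), (l.foldl (pvRoundStep d) (s, true)).2 = true := by
  intro l
  induction l with
  | nil => intro s; rfl
  | cons k t ih =>
    intro s
    simp only [List.foldl_cons]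
    rcases pvRoundStep_cases d (s, true) k with hc | ⟨-, hc, -⟩
    · rw [hc]; exact ih s
    · rw [hc]; exact ih (s ++ [k])

theorem pvRound_false_id (d : List (String × List (String × String))) :
    ∀ (l : List String) (s : List String),
      (l.foldl (pvRoundStep d) (s, false)).2 = false →
      (l.foldl (pvRoundStep d) (s, false)).1 = s := by
  intro l
  induction l with
  | nil => intro s _; rfl
  | cons k t ih =>
    intro s h
    simp only [List.foldl_cons] at h ⊢
    rcases pvRoundStep_cases d (s, false) k with hc | ⟨-, hc, -⟩
    · rw [hc] at h ⊢; exact ih s h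
    · rw [hc] at h
      have := pvRound_true d t (s ++ [k])
      rw [h] at this
      cases this

theorem pvRound_grow (d : List (String × List (String × String))) :
    ∀ (l : List String) (s : List String),
      (l.foldl (pvRoundStep d) (s, false)).2 = true →
      s.length < (l.foldl (pvRoundStep d) (s, false)).1.length := by
  intro l
  induction l with
  | nil => intro s h; simp at h
  | cons k t ih =>
    intro s h
    simp only [List.foldl_cons] at h ⊢
    rcases pvRoundStep_cases d (s, false) k with hc | ⟨hk, hc, -⟩
    · rw [hc] at h ⊢; exact ih s h
    · rw [hc]
      dsimp only
      have hlen := pvRound_len d t (s ++ [k], true)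
      simp only [List.length_append, List.length_singleton] at hlen
      omega

theorem pvRound_fixpoint (d : List (String × List (String × String))) :
    ∀ (l : List String) (s : List String),
      (l.foldl (pvRoundStep d) (s, false)).2 = false →
      ∀ k ∈ l, ∀ cfg, pvLookup d k = some cfg →
        k ∈ s ∨ ∃ e, pvExtends cfg = some e ∧ e ∉ s := by
  intro l
  induction l with
  | nil => intro s _ k hk; simp at hk
  | cons k0 t ih =>
    intro s h k hk cfg hcfg
    simp only [List.foldl_cons] at h
    rcases pvRoundStep_cases d (s, false) k0 with hc | ⟨-, hc, -⟩
    · rw [hc] at h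
      rcases List.mem_cons.mp hk with rfl | hkt
      · exact pvRoundStep_stay d s k cfg hcfg hc
      · exact ih s h k hkt cfg hcfg
    · rw [hc] at h
      have := pvRound_true d t (s ++ [k0])
      rw [h] at this
      cases this

theorem pvRound_sound (d : List (String × List (String × String))) :
    ∀ (l : List String) (sc : List String × Bool),
      (∀ y ∈ sc.1, ∃ n, pvTerm d n y = true) →
      ∀ y ∈ (l.foldl (pvRoundStep d) sc).1, ∃ n, pvTerm d n y = true := by
  intro l
  induction l with
  | nil => intro sc hinv; exact hinv
  | cons k t ih =>
    intro sc hinv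
    simp only [List.foldl_cons]
    rcases pvRoundStep_cases d sc k with hc | ⟨hk, hc, cfg, hcfg, hjust⟩
    · rw [hc]; exact ih sc hinv
    · rw [hc]
      apply ih
      intro y hy
      rcases List.mem_append.mp hy with hy | hy
      · exact hinv y hy
      · simp only [List.mem_singleton] at hy
        subst hy
        rcases hjust with he | ⟨e, he, hes⟩
        · exact ⟨1, by simp [pvTerm, pvStep, hcfg, he]⟩
        · obtain ⟨n, hn⟩ := hinv e hes
          refine ⟨n + 1, ?_⟩
          have hstep : pvStep d y = some e := by simp [pvStep, hcfg, he]
          simp only [pvTerm, hstep]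
          exact hn

-- ----- facts about B's fixpoint -----
theorem pvFix_sound (d : List (String × List (String × String))) :
    ∀ (fuel : Nat) (s : List String), (∀ y ∈ s, ∃ n, pvTerm d n y = true) →
      ∀ y ∈ pvFix d fuel s, ∃ n, pvTerm d n y = true := by
  intro fuel
  induction fuel with
  | zero => intro s hinv; exact hinv
  | succ n ih =>
    intro s hinv
    have hr := pvRound_sound d (PySem.List.dedup (d.map Prod.fst)) (s, false) hinv
    simp only [pvFix]
    cases hrc : pvRound d (s, false) with
    | mk s' ch =>
      have hs' : ∀ y ∈ s', ∃ m, pvTerm d m y = true := by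
        unfold pvRound at hrc
        rw [hrc] at hr
        exact hr
      cases ch with
      | true => exact ih s' hs'
      | false => exact hs'

theorem pvFix_fixed (d : List (String × List (String × String))) :
    ∀ (fuel : Nat) (s : List String), s.Nodup →
      (∀ y ∈ s, y ∈ PySem.List.dedup (d.map Prod.fst)) →
      (PySem.List.dedup (d.map Prod.fst)).length < fuel + s.length →
      (pvRound d (pvFix d fuel s, false)).2 = false := by
  intro fuel
  induction fuel with
  | zero =>
    intro s hnd hsub hlt
    exact absurd ((hnd.subperm (fun y hy => hsub y hy)).length_le) (by omega)
  | succ n ih =>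
    intro s hnd hsub hlt
    simp only [pvFix]
    cases hrc : pvRound d (s, false) with
    | mk s' ch =>
      have hrc' : (PySem.List.dedup (d.map Prod.fst)).foldl (pvRoundStep d) (s, false) = (s', ch) := by
        unfold pvRound at hrc; exact hrc
      cases ch with
      | false =>
        have hfid : s' = s := by
          have h2 := pvRound_false_id d (PySem.List.dedup (d.map Prod.fst)) s
            (by rw [hrc'])
          rw [hrc'] at h2
          exact h2
        rw [hfid, hrc]
      | true =>
        have hgrow := pvRound_grow d (PySem.List.dedup (d.map Prod.fst)) s (by rw [hrc'])
        rw [hrc'] at hgrow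
        obtain ⟨hnd', hmem'⟩ := pvRound_nodup d (PySem.List.dedup (d.map Prod.fst)) (s, false) hnd
        rw [hrc'] at hnd' hmem'
        apply ih s' hnd'
        · intro y hy
          rcases hmem' y hy with h | h
          · exact hsub y h
          · exact h
        · have hlen' : s'.length ≤ (PySem.List.dedup (d.map Prod.fst)).length := by
            refine (hnd'.subperm (fun y hy => ?_)).length_le
            rcases hmem' y hy with h | h
            · exact hsub y h
            · exact h
          have hg : s.length < s'.length := hgrow
          have hlen2 : s'.length ≤ (PySem.List.dedup (d.map Prod.fst)).length := hlen'
          omega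

theorem pvSafe_sound (d : List (String × List (String × String))) :
    ∀ y ∈ pvSafe d, ∃ n, pvTerm d n y = true := by
  intro y hy
  exact pvFix_sound d _ [] (by simp) y hy

theorem pvSafe_complete {d : List (String × List (String × String))}
    (hP : Pre_find_circular_inheritance d) :
    ∀ n x, pvTerm d n x = true → x ∈ PySem.List.dedup (d.map Prod.fst) →
      x ∈ pvSafe d := by
  have hRF : (pvRound d (pvSafe d, false)).2 = false := by
    unfold pvSafe
    exact pvFix_fixed d _ [] (List.nodup_nil) (by simp) (by simp)
  have hRF' : ((PySem.List.dedup (d.map Prod.fst)).foldl (pvRoundStep d) (pvSafe d, false)).2 = false := by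
    unfold pvRound at hRF; exact hRF
  intro n
  induction n with
  | zero => intro x h; simp [pvTerm] at h
  | succ n ih =>
    intro x ht hx
    by_cases hin : x ∈ pvSafe d
    · exact hin
    exfalso
    have hx' : x ∈ d.map Prod.fst := (PySem.List.mem_dedup _ _).mp hx
    obtain ⟨cfg, hl⟩ := pvLookup_isSome d x hx'
    rcases pvRound_fixpoint d _ _ hRF' x hx cfg hl with h | ⟨e, he, hens⟩
    · exact hin h
    · have hstep : pvStep d x = some e := by simp [pvStep, hl, he]
      simp only [pvTerm, hstep] at ht
      exact hens (ih e ht ((PySem.List.mem_dedup _ _).mpr (pvStep_closed hP hstep)))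

-- ----- the per-key walks agree with the safe set -----
theorem pvWalk_of_safe (d : List (String × List (String × String))) {c : String}
    (hc : c ∈ pvSafe d) : pvWalkB d [c] c (d.length + 1) = none := by
  obtain ⟨n, ht⟩ := pvSafe_sound d c hc
  apply pvWalkB_none_of_term d _ n [c] c ht
  intro y hy
  simp only [List.mem_singleton] at hy
  subst hy
  exact ⟨0, rfl⟩

theorem pvWalk_of_unsafe {d : List (String × List (String × String))}
    (hP : Pre_find_circular_inheritance d) {c : String}
    (hc : c ∈ PySem.List.dedup (d.map Prod.fst)) (hns : c ∉ pvSafe d) :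
    pvWalkB d [c] c (d.length + 1) ≠ none := by
  intro hnone
  apply hns
  have hc' : c ∈ d.map Prod.fst := (PySem.List.mem_dedup _ _).mp hc
  have hlen : (PySem.List.dedup (d.map Prod.fst)).length ≤ d.length := by
    rw [PySem.List.dedup_eq_ofList]
    calc (PySem.Set.ofList (d.map Prod.fst)).length
        ≤ (d.map Prod.fst).length := PySem.Set.length_ofList_le _
      _ = d.length := List.length_map ..
  have ht := pvWalkB_none_term hP (d.length + 1) [c] c hnone (List.nodup_singleton c)
    (by intro y hy; simp only [List.mem_singleton] at hy; exact hy ▸ hc') hc'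
    (by simp only [List.length_singleton]; omega)
  simp only [List.length_singleton, Nat.add_sub_cancel] at ht
  exact pvSafe_complete hP _ c ht hc

theorem pvLoops_eq {d : List (String × List (String × String))}
    (hP : Pre_find_circular_inheritance d) :
    ∀ ks, (∀ c ∈ ks, c ∈ PySem.List.dedup (d.map Prod.fst)) →
      pvLoopA d ks = pvLoopB d (pvSafe d) ks := by
  intro ks
  induction ks with
  | nil => intro _; rfl
  | cons c cs ih =>
    intro hks
    simp only [pvLoopA, pvLoopB]
    rw [pvWalkAB]
    by_cases hc : c ∈ pvSafe d
    · rw [pvWalk_of_safe d hc, if_pos hc]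
      exact ih (fun x h => hks x (List.mem_cons_of_mem _ h))
    · cases hw : pvWalkB d [c] c (d.length + 1) with
      | none => exact absurd hw (pvWalk_of_unsafe hP (hks c (List.mem_cons_self ..)) hc)
      | some p => simp [hc]

-- ===== VERDICT (by name: the statement is the Claim_ definition above) =====
theorem find_circular_inheritance_spec : Claim_equal_find_circular_inheritance := by
  intro configs _ hPre
  unfold Spec_find_circular_inheritance find_circular_inheritance find_circular_inheritance_alt
  exact pvLoops_eq hPre _ (fun c h => h)
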